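-- pv_equiv track=rewrite | github.com/Nishu-05/pythonN | max.py | max_weights
-- ===== SOURCE A (Python) =====
-- def max_weights(N, M, capacities, items):
--     results = []
--
--     for capacity in capacities:
--         total_weight = 0
--         for price, weight in items:
--             if price <= capacity:
--                 total_weight += weight
--         results.append(total_weight)
--
--     return results
-- ===== SOURCE B (Python) =====
-- def max_weights(N, M, capacities, items):
--     sorted_items = sorted(items, key=lambda it: it[0])
--     prices = [p for p, _ in sorted_items]
--     prefix = [0]
--     total = 0
--     for _, w in sorted_items:
--         total += w
--         prefix.append(total)
--     results = []
--     for c in capacities: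
--         lo, hi = 0, len(prices)
--         while lo < hi:
--             mid = (lo + hi) // 2
--             if prices[mid] <= c:
--                 lo = mid + 1
--             else:
--                 hi = mid
--         results.append(prefix[lo])
--     return results
-- ===== Notes on version B (the rewrite author's own statement) =====
-- stated objective: faster
-- what changed: Replaced the per-capacity rescan of all items (O(M*N)) by sorting items by price once, building a prefix-sum array of weights, and answering each capacity with a hand-written binary search into the prefix sums (O((N+M) log N)).
import Mathlib
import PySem

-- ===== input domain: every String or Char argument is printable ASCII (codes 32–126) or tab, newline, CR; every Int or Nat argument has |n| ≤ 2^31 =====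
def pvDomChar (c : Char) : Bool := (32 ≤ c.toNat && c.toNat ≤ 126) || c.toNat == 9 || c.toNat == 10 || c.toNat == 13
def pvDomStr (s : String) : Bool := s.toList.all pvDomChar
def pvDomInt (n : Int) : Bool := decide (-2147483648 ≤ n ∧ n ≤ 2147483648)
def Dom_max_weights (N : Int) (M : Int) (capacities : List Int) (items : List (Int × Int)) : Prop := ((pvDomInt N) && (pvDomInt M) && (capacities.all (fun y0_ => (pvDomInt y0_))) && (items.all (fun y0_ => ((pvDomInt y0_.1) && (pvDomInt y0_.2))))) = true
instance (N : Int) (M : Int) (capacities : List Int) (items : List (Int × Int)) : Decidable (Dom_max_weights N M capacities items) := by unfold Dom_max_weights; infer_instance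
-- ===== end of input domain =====

-- B replaces A's per-capacity rescan of all items by sort + prefix sums + binary search (faster).

-- ===== PORT A =====
def max_weights (N : Int) (M : Int) (capacities : List Int) (items : List (Int × Int)) : List Int :=
  capacities.foldl (fun results capacity =>
    results ++ [items.foldl (fun total_weight pw =>
      if pw.1 ≤ capacity then total_weight + pw.2 else total_weight) 0]) []

-- ===== PORT B =====
-- the hand-written bisect_right loop of Source B ('while lo < hi: …')
def pvBisect (prices : List Int) (c : Int) (lo hi : Nat) : Nat :=
  if h : lo < hi then
    if prices.getD ((lo + hi) / 2) 0 ≤ c then pvBisect prices c ((lo + hi) / 2 + 1) hi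
    else pvBisect prices c lo ((lo + hi) / 2)
  else lo
termination_by hi - lo
decreasing_by all_goals omega

def max_weights_alt (N : Int) (M : Int) (capacities : List Int) (items : List (Int × Int)) : List Int :=
  let sorted_items := PySem.List.sorted items (fun it => it.1) false
  let prices := sorted_items.map (fun pw => pw.1)
  let pt := sorted_items.foldl
    (fun (st : List Int × Int) pw => (st.1 ++ [st.2 + pw.2], st.2 + pw.2)) ([0], 0)
  capacities.foldl (fun results c =>
    results ++ [pt.1.getD (pvBisect prices c 0 prices.length) 0]) []

-- ===== PRECONDITION & SPEC =====
def Spec_max_weights (N : Int) (M : Int) (capacities : List Int) (items : List (Int × Int)) (out : List Int) : Prop := out = max_weights_alt N M capacities items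
instance (N : Int) (M : Int) (capacities : List Int) (items : List (Int × Int)) (out : List Int) : Decidable (Spec_max_weights N M capacities items out) := by unfold Spec_max_weights; infer_instance

-- ===== CLAIM (what is proved, stated in full; the proofs are below) =====
def Claim_equal_max_weights : Prop := ∀ (N : Int) (M : Int) (capacities : List Int) (items : List (Int × Int)), Dom_max_weights N M capacities items → Spec_max_weights N M capacities items (max_weights N M capacities items)

-- ===== LEMMAS AND PROOFS =====

-- A's inner loop computes the sum of the weights of the items with price ≤ c
theorem innerA_eq_filter_sum (items : List (Int × Int)) (c : Int) (a : Int) :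
    items.foldl (fun total_weight pw =>
      if pw.1 ≤ c then total_weight + pw.2 else total_weight) a
      = a + ((items.filter (fun pw => decide (pw.1 ≤ c))).map (fun pw => pw.2)).sum := by
  induction items generalizing a with
  | nil => simp
  | cons x xs ih =>
    simp only [List.foldl_cons, List.filter_cons]
    by_cases h : x.1 ≤ c <;> simp [h, ih, add_assoc]

-- B's prefix list is the list of all partial sums of the weights
theorem prefix_fold_eq (s : List (Int × Int)) (P : List Int) (t : Int) :
    (s.foldl (fun (st : List Int × Int) pw => (st.1 ++ [st.2 + pw.2], st.2 + pw.2)) (P, t)).1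
      = P ++ (List.range s.length).map
          (fun k => t + (((s.take (k + 1)).map (fun pw => pw.2)).sum)) := by
  induction s generalizing P t with
  | nil => simp
  | cons x xs ih =>
    simp only [List.foldl_cons, ih, List.length_cons, List.range_succ_eq_map]
    simp [List.append_assoc, List.map_map, Function.comp, add_assoc]

theorem prefix_fold_getD (s : List (Int × Int)) (k : Nat) (hk : k ≤ s.length) :
    ((s.foldl (fun (st : List Int × Int) pw => (st.1 ++ [st.2 + pw.2], st.2 + pw.2)) ([0], 0)).1).getD k 0
      = ((s.take k).map (fun pw => pw.2)).sum := by
  rw [prefix_fold_eq]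
  cases k with
  | zero => simp
  | succ k =>
    have hk' : k < s.length := by omega
    have : ([(0 : Int)] ++ (List.range s.length).map
        (fun k => (0 : Int) + (((s.take (k + 1)).map (fun pw => pw.2)).sum))).getD (k + 1) 0
        = ((List.range s.length).map
        (fun k => (0 : Int) + (((s.take (k + 1)).map (fun pw => pw.2)).sum))).getD k 0 := by
      simp [List.getD]
    rw [this, List.getD_eq_getElem?_getD, List.getElem?_map, List.getElem?_range hk']
    simp

-- in a price-sorted list, the element at index m is ≤ c iff m lies before the takeWhile prefix
theorem sorted_getElem_le_iff (l : List Int) (hp : l.Pairwise (· ≤ ·)) (c : Int)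
    (m : Nat) (hm : m < l.length) :
    l[m] ≤ c ↔ m < (l.takeWhile (fun p => decide (p ≤ c))).length := by
  induction l generalizing m with
  | nil => simp at hm
  | cons a l ih =>
    rcases List.pairwise_cons.mp hp with ⟨ha, hp'⟩
    by_cases hac : a ≤ c
    · have htw : List.takeWhile (fun p => decide (p ≤ c)) (a :: l)
          = a :: List.takeWhile (fun p => decide (p ≤ c)) l := by
        simp [List.takeWhile_cons, hac]
      cases m with
      | zero => simp [htw, hac]
      | succ m =>
        have hm' : m < l.length := by simpa using hm
        simp only [List.getElem_cons_succ, htw, List.length_cons]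
        rw [ih hp' m hm']
        omega
    · have htw : List.takeWhile (fun p => decide (p ≤ c)) (a :: l) = [] := by
        simp [List.takeWhile_cons, hac]
      cases m with
      | zero => simp [htw, hac]
      | succ m =>
        have hm' : m < l.length := by simpa using hm
        have hle : a ≤ l[m]'hm' := ha _ (List.getElem_mem hm')
        simp only [List.getElem_cons_succ, htw, List.length_nil]
        constructor
        · intro h; exact absurd (le_trans hle h) hac
        · omega

-- the binary search of Source B lands exactly on the takeWhile boundary
theorem pvBisect_correct (prices : List Int) (hp : prices.Pairwise (· ≤ ·)) (c : Int)
    (lo hi : Nat) (hlo : lo ≤ (prices.takeWhile (fun p => decide (p ≤ c))).length)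
    (hhi : (prices.takeWhile (fun p => decide (p ≤ c))).length ≤ hi)
    (hlen : hi ≤ prices.length) :
    pvBisect prices c lo hi = (prices.takeWhile (fun p => decide (p ≤ c))).length := by
  set k := (prices.takeWhile (fun p => decide (p ≤ c))).length with hk
  unfold pvBisect
  split
  · next h =>
    have hmid : (lo + hi) / 2 < prices.length := by omega
    have hgd : prices.getD ((lo + hi) / 2) 0 = prices[(lo + hi) / 2] :=
      List.getD_eq_getElem prices 0 hmid
    rw [hgd]

    by_cases hle : prices[(lo + hi) / 2] ≤ c
    · have hlt : (lo + hi) / 2 < k := (sorted_getElem_le_iff prices hp c _ hmid).mp hle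
      rw [if_pos hle]
      exact pvBisect_correct prices hp c ((lo + hi) / 2 + 1) hi (by omega) hhi hlen
    · have hge : ¬ ((lo + hi) / 2 < k) := fun hl =>
        hle ((sorted_getElem_le_iff prices hp c _ hmid).mpr hl)
      rw [if_neg hle]
      exact pvBisect_correct prices hp c lo ((lo + hi) / 2) hlo (by omega) (by omega)
  · next h => omega
termination_by hi - lo
decreasing_by all_goals omega

-- in a price-sorted item list, filtering by price ≤ c is taking the initial segment
theorem sorted_filter_eq_takeWhile (s : List (Int × Int))
    (hp : s.Pairwise (fun a b => a.1 ≤ b.1)) (c : Int) :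
    s.filter (fun pw => decide (pw.1 ≤ c)) = s.takeWhile (fun pw => decide (pw.1 ≤ c)) := by
  induction s with
  | nil => rfl
  | cons a s ih =>
    rcases List.pairwise_cons.mp hp with ⟨ha, hp'⟩
    by_cases hac : a.1 ≤ c
    · simp [List.filter_cons, List.takeWhile_cons, hac, ih hp']
    · have hd : (decide (a.1 ≤ c)) = false := by simp [hac]
      simp only [List.filter_cons, List.takeWhile_cons, hd, Bool.false_eq_true, if_false]
      exact List.filter_eq_nil_iff.mpr (fun x hx => by
        simp only [decide_eq_true_eq]
        exact fun hxc => hac (le_trans (ha x hx) hxc))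

-- ===== VERDICT (by name: the statement is the Claim_ definition above) =====
theorem max_weights_spec : Claim_equal_max_weights := by
  intro N M capacities items _
  unfold Spec_max_weights max_weights max_weights_alt
  rw [PySem.List.foldl_append_singleton_eq_map, PySem.List.foldl_append_singleton_eq_map]
  simp only [List.nil_append]
  apply List.map_congr_left
  intro c _
  set s := PySem.List.sorted items (fun it => it.1) false with hs
  have hperm : s.Perm items := PySem.List.sorted_perm items (fun it => it.1) false
  have hpair : s.Pairwise (fun a b => a.1 ≤ b.1) :=
    PySem.List.sorted_pairwise items (fun it => it.1)
  have hpair' : (s.map (fun pw => pw.1)).Pairwise (· ≤ ·) :=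
    List.pairwise_map.mpr hpair
  -- left side: A's sum over items = sum over filtered sorted list
  rw [innerA_eq_filter_sum, zero_add]
  have hAsum : ((items.filter (fun pw => decide (pw.1 ≤ c))).map (fun pw => pw.2)).sum
      = ((s.filter (fun pw => decide (pw.1 ≤ c))).map (fun pw => pw.2)).sum :=
    (((hperm.filter _).map _).sum_eq).symm
  rw [hAsum, sorted_filter_eq_takeWhile s hpair c]
  -- right side: bisect returns the takeWhile length, prefix sums return its sum
  have hk : (List.takeWhile (fun p => decide (p ≤ c)) (s.map (fun pw => pw.1))).length
      = (s.takeWhile (fun pw => decide (pw.1 ≤ c))).length := by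
    rw [List.takeWhile_map, List.length_map]
    simp [Function.comp_def]
  have hkle : (s.takeWhile (fun pw => decide (pw.1 ≤ c))).length ≤ s.length :=
    (List.takeWhile_prefix _).length_le
  have hb : pvBisect (s.map (fun pw => pw.1)) c 0 (s.map (fun pw => pw.1)).length
      = (s.takeWhile (fun pw => decide (pw.1 ≤ c))).length := by
    rw [pvBisect_correct (s.map (fun pw => pw.1)) hpair' c 0 (s.map (fun pw => pw.1)).length
      (Nat.zero_le _) (by rw [hk, List.length_map]; exact hkle) (le_refl _)]
    exact hk
  rw [hb, prefix_fold_getD s _ hkle]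
  rw [← List.prefix_iff_eq_take.mp (List.takeWhile_prefix _)]
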